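-- pv_equiv track=rewrite | github.com/lycheesodaa/foundation-model-emotions | data_processing/window_based_reformation.py | make_window_idx
-- ===== SOURCE A (Python) =====
-- def make_window_idx(frame_length, frame_idx, overlap, window_type):
--     """
--     This function will create the index list for making overlapped windows,
--     through which, we will produce statistical features.
--
--     For example, make_window_idx(80, 30, 15, window_type='dynamic') returns:
--     [[0, 29], [15, 44], [30, 59], [45, 74], [60, 79]]
--
--     If window_type='static', it will return:
--     [[0, 79]]
--     """
--     index_list = []
--
--     if window_type == "dynamic":
--         i = 0
--         j = 0
--         while j < frame_length:
--             if (i + frame_idx - 1) < frame_length: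
--                 index_list.append([i, i + frame_idx])
--                 j = i + frame_idx - 1
--             else:
--                 index_list.append([i, frame_length])
--                 break
--             i += overlap
--     elif window_type == "static":
--         index_list = [[0, frame_length]]
--
--     return index_list
-- ===== SOURCE B (Python) =====
-- def make_window_idx(frame_length, frame_idx, overlap, window_type):
--     if window_type == "static":
--         return [[0, frame_length]]
--     if window_type != "dynamic" or frame_length <= 0:
--         return []
--     if frame_idx - 1 >= frame_length:
--         return [[0, frame_length]]
--     # closed form: the full windows start at m*overlap for exactly the m with
--     # m*overlap + frame_idx - 1 < frame_length, i.e. m <= (frame_length - frame_idx) // overlap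
--     k = (frame_length - frame_idx) // overlap + 1
--     return [[m * overlap, m * overlap + frame_idx] for m in range(k)] + [[k * overlap, frame_length]]
-- ===== Notes on version B (the rewrite author's own statement) =====
-- stated objective: alternative
-- what changed: Replaces A's stateful while loop by a closed form: the number of full windows is computed arithmetically as (frame_length - frame_idx) // overlap + 1 and the output is built by indexing over range(k), with no iterative stepping of the start position.
import Mathlib
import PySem

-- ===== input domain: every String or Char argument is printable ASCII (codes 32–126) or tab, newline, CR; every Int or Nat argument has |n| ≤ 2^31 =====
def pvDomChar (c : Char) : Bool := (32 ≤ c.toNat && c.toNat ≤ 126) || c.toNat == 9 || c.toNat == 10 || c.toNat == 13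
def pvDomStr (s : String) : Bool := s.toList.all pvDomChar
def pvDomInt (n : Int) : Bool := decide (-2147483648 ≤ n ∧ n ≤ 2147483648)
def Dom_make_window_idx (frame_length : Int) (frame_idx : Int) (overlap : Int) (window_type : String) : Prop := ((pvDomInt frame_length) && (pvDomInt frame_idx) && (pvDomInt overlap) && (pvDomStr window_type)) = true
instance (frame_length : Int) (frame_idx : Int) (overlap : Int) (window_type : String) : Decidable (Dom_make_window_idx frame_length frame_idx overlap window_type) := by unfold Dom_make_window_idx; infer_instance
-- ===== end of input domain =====

-- B replaces A's stateful while loop by a closed form: the number of full windows is one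
-- floor division and the output is a map over range(k) (objective: alternative; same cost).

-- ===== PORT A =====
-- A's while loop over state (i, j, index_list); fuel is only a totality guard
-- (whenever the Python loop terminates it does so well within it; the fuel-0 escape
-- is reached only on inputs where the Python loops forever, which Pre_ excludes).
def pvLoopA (fl fi ov : Int) : Nat → Int → Int → List (List Int) → List (List Int)
  | 0, i, _, acc => acc ++ [[i, fl]]
  | Nat.succ fuel, i, j, acc =>
    if j < fl then
      if i + fi - 1 < fl then
        pvLoopA fl fi ov fuel (i + ov) (i + fi - 1) (acc ++ [[i, i + fi]])
      else acc ++ [[i, fl]]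
    else acc

def make_window_idx (frame_length : Int) (frame_idx : Int) (overlap : Int) (window_type : String) : List (List Int) :=
  if window_type = "dynamic" then
    pvLoopA frame_length frame_idx overlap ((frame_length - frame_idx + 2).toNat + 1) 0 0 []
  else if window_type = "static" then [[0, frame_length]]
  else []

-- ===== PORT B =====
def make_window_idx_alt (frame_length : Int) (frame_idx : Int) (overlap : Int) (window_type : String) : List (List Int) :=
  if window_type = "static" then [[0, frame_length]]
  else if window_type ≠ "dynamic" ∨ frame_length ≤ 0 then []
  else if frame_idx - 1 ≥ frame_length then [[0, frame_length]]
  else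
    ((PySem.List.pyRange 0 (PySem.Int.floordiv (frame_length - frame_idx) overlap + 1) 1).map
        (fun m => [m * overlap, m * overlap + frame_idx])) ++
      [[(PySem.Int.floordiv (frame_length - frame_idx) overlap + 1) * overlap, frame_length]]

-- ===== PRECONDITION & SPEC =====
-- Pre_ excludes exactly the inputs on which A's while loop never terminates (dynamic,
-- 0 < frame_length, frame_idx ≤ frame_length, overlap ≤ 0): A returns on everything else.
def Pre_make_window_idx (frame_length : Int) (frame_idx : Int) (overlap : Int) (window_type : String) : Prop :=
  window_type = "dynamic" → 0 < frame_length → frame_idx ≤ frame_length → 0 < overlap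
instance (frame_length : Int) (frame_idx : Int) (overlap : Int) (window_type : String) : Decidable (Pre_make_window_idx frame_length frame_idx overlap window_type) := by unfold Pre_make_window_idx; infer_instance

def pvWitness_make_window_idx : Int × Int × Int × String := (80, 30, 15, "dynamic")

def Spec_make_window_idx (frame_length : Int) (frame_idx : Int) (overlap : Int) (window_type : String) (out : List (List Int)) : Prop := out = make_window_idx_alt frame_length frame_idx overlap window_type
instance (frame_length : Int) (frame_idx : Int) (overlap : Int) (window_type : String) (out : List (List Int)) : Decidable (Spec_make_window_idx frame_length frame_idx overlap window_type out) := by unfold Spec_make_window_idx; infer_instance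

-- ===== CLAIM =====
def Claim_equal_make_window_idx : Prop := ∀ (frame_length : Int) (frame_idx : Int) (overlap : Int) (window_type : String), Dom_make_window_idx frame_length frame_idx overlap window_type → Pre_make_window_idx frame_length frame_idx overlap window_type → Spec_make_window_idx frame_length frame_idx overlap window_type (make_window_idx frame_length frame_idx overlap window_type)

-- ===== LEMMAS AND PROOFS =====

-- A's loop (entered with j < fl, positive overlap) produces exactly n full windows and
-- then the capped one, where n is the closed-form count (fl - fi - i).fdiv ov + 1.
theorem pvLoopA_closed (fl fi ov : Int) (hov : 0 < ov) :
    ∀ (fuel n : Nat) (i j : Int) (acc : List (List Int)), j < fl → n < fuel →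
    ((i ≤ fl - fi → (n : Int) = Int.fdiv (fl - fi - i) ov + 1) ∧ (fl - fi < i → n = 0)) →
    pvLoopA fl fi ov fuel i j acc =
      acc ++ (List.range n).map (fun (m : Nat) => ([i + (m : Int) * ov, i + (m : Int) * ov + fi] : List Int))
          ++ [[i + (n : Int) * ov, fl]] := by
  intro fuel
  induction fuel with
  | zero => intro n i j acc _ hn _; omega
  | succ fuel ih =>
    intro n i j acc hj hfuel hn
    simp only [pvLoopA, if_pos hj]
    by_cases h : i + fi - 1 < fl
    · rw [if_pos h]
      have hle : i ≤ fl - fi := by omega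
      have hd0 : 0 ≤ Int.fdiv (fl - fi - i) ov := Int.fdiv_nonneg (by omega) (by omega)
      have hn1 : (n : Int) = Int.fdiv (fl - fi - i) ov + 1 := hn.1 hle
      obtain ⟨n', rfl⟩ : ∃ n', n = n' + 1 := ⟨n - 1, by omega⟩
      have hstep : Int.fdiv (fl - fi - (i + ov)) ov = Int.fdiv (fl - fi - i) ov - 1 := by
        have h2 : fl - fi - (i + ov) = fl - fi - i + (-1) * ov := by ring
        rw [h2, Int.add_mul_fdiv_right _ _ (by omega)]; omega
      have h0small : fl - fi < i + ov → Int.fdiv (fl - fi - i) ov = 0 := by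
        intro hgt
        rw [Int.fdiv_eq_ediv, if_pos (Or.inl hov.le), sub_zero]
        exact Int.ediv_eq_zero_of_lt (by omega) (by omega)
      rw [ih n' (i + ov) (i + fi - 1) (acc ++ [[i, i + fi]]) h (by omega)
            ⟨by intro _; rw [hstep]; push_cast at hn1 ⊢; omega,
             by intro hgt; have := h0small hgt; push_cast at hn1; omega⟩]
      rw [List.range_succ_eq_map, List.map_cons, List.map_map]
      simp only [List.append_assoc, List.cons_append, List.nil_append]
      congr 1
      congr 1
      · push_cast; ring_nf
      congr 1
      · apply List.map_congr_left
        intro m _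
        simp only [Function.comp_apply, List.cons.injEq]
        refine ⟨by push_cast; ring, by push_cast; ring, trivial⟩
      · simp only [List.cons.injEq]
        exact ⟨⟨by push_cast; ring, trivial⟩, trivial⟩
    · rw [if_neg h]
      have hn0 : n = 0 := by
        by_cases hle : i ≤ fl - fi
        · omega
        · exact hn.2 (by omega)
      subst hn0
      simp

-- ===== VERDICT =====
theorem make_window_idx_spec : Claim_equal_make_window_idx := by
  intro fl fi ov wt _ hpre
  unfold Spec_make_window_idx make_window_idx make_window_idx_alt
  by_cases hs : wt = "static"
  · subst hs; simp
  · by_cases hd : wt = "dynamic"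
    · subst hd
      simp only [if_neg (by decide : ("dynamic" : String) ≠ "static")]
      by_cases hfl : fl ≤ 0
      · simp only [if_pos (Or.inr hfl)]
        cases h : (fl - fi + 2).toNat + 1 with
        | zero => omega
        | succ n => simp [pvLoopA, not_lt.mpr hfl]
      · have hpos : 0 < fl := by omega
        simp only [if_neg (by simp [hfl] : ¬ (("dynamic" : String) ≠ "dynamic" ∨ fl ≤ 0))]
        by_cases hbig : fi - 1 ≥ fl
        · rw [if_pos hbig]
          cases h : (fl - fi + 2).toNat + 1 with
          | zero => omega
          | succ n => simp [pvLoopA, hpos, show ¬ fi ≤ fl by omega]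
        · rw [if_neg hbig]
          have hov : 0 < ov := hpre rfl hpos (by omega)
          have hfd : PySem.Int.floordiv (fl - fi) ov = Int.fdiv (fl - fi) ov := by
            rw [PySem.Int.floordiv_eq_ediv_of_pos hov, Int.fdiv_eq_ediv, if_pos (Or.inl hov.le), sub_zero]
          have hd0 : 0 ≤ Int.fdiv (fl - fi) ov := Int.fdiv_nonneg (by omega) (by omega)
          have hdle : Int.fdiv (fl - fi) ov ≤ fl - fi := by
            have h1 : (fl - fi) / ov ≤ fl - fi := Int.ediv_le_self ov (by omega)
            rw [Int.fdiv_eq_ediv, if_pos (Or.inl hov.le)]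
            omega
          set n : Nat := (Int.fdiv (fl - fi) ov).toNat + 1 with hn
          have hki : PySem.Int.floordiv (fl - fi) ov + 1 = (n : Int) := by
            rw [hfd, hn]; push_cast; omega
          rw [pvLoopA_closed fl fi ov hov _ n 0 0 [] hpos (by omega)
                ⟨by intro _; rw [show fl - fi - 0 = fl - fi by ring, hn]; push_cast; omega, by omega⟩]
          rw [hki, PySem.List.pyRange_one]
          simp [List.map_map, Function.comp_def]
    · simp [if_neg hs, if_neg hd, Or.inl hd]
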